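-- pv_equiv track=rewrite | github.com/tfvs2023-hub/songlab | songlab_backend/mbti_engine.py | _select_songs_by_gender
-- ===== SOURCE A (Python) =====
-- from typing import Dict, List, Tuple
--
-- def _select_songs_by_gender(base_type: Dict, gender: str) -> List[str]:
--     """
--     성별 기반 추천 곡 선택
--     """
--     base_songs = base_type['base_songs']
--
--     if gender.lower() == 'female':
--         return base_songs.get('female', base_songs.get('male', []))
--     elif gender.lower() == 'male':
--         return base_songs.get('male', base_songs.get('female', []))
--     else:
--         # 성별 불명 시 두 리스트 혼합
--         female_songs = base_songs.get('female', [])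
--         male_songs = base_songs.get('male', [])
--         mixed_songs = []
--
--         # 번갈아가며 선택
--         max_len = max(len(female_songs), len(male_songs))
--         for i in range(max_len):
--             if i < len(female_songs):
--                 mixed_songs.append(female_songs[i])
--             if i < len(male_songs):
--                 mixed_songs.append(male_songs[i])
--
--         return mixed_songs[:6]  # 최대 6곡
-- ===== SOURCE B (Python) =====
-- def _select_songs_by_gender(base_type, gender):
--     base_songs = base_type['base_songs']
--     g = gender.lower()
--     if g == 'female':
--         return base_songs.get('female', base_songs.get('male', []))
--     if g == 'male':
--         return base_songs.get('male', base_songs.get('female', []))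
--     female = base_songs.get('female', [])
--     male = base_songs.get('male', [])
--     # interleave the zipped prefix, then append whichever list still has a tail
--     mixed = [s for pair in zip(female, male) for s in pair]
--     k = len(mixed) // 2
--     mixed += female[k:] or male[k:]
--     return mixed[:6]
-- ===== Notes on version B (the rewrite author's own statement) =====
-- stated objective: idiomatic
-- what changed: The else-branch index-loop over range(max_len) with two length guards is replaced by a zip-based interleave of the paired prefix followed by appending the leftover tail of the longer list.
import Mathlib
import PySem

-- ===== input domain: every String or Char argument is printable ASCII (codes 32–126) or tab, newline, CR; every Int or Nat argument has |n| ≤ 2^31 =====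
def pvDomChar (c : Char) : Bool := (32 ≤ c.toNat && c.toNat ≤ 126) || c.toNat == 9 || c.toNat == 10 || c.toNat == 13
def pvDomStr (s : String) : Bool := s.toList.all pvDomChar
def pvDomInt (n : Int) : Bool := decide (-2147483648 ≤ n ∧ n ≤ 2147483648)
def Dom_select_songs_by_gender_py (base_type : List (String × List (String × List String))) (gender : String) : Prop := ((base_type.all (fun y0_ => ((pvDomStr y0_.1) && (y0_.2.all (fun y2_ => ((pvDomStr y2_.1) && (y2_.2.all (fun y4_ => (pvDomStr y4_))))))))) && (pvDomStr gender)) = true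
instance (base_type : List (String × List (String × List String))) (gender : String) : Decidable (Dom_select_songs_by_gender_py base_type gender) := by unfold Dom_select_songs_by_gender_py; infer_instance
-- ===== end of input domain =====

-- B replaces A's index-based interleave loop by a zip-based interleave plus leftover tail (idiomatic; same cost).

-- shared dict primitive: first-match association-list lookup (Python dict.get)
def pyAssocGet? {α : Type} (d : List (String × α)) (k : String) : Option α :=
  (d.find? (fun p => p.1 == k)).map (·.2)

def pyAssocGetD {α : Type} (d : List (String × α)) (k : String) (dflt : α) : α :=
  (pyAssocGet? d k).getD dflt

-- ===== PORT A =====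
def select_songs_by_gender_py (base_type : List (String × List (String × List String))) (gender : String) : List String :=
  match pyAssocGet? base_type "base_songs" with
  | none => []  -- KeyError in Python; excluded by Pre_
  | some base_songs =>
    if PySem.Str.lower gender == "female" then
      pyAssocGetD base_songs "female" (pyAssocGetD base_songs "male" [])
    else if PySem.Str.lower gender == "male" then
      pyAssocGetD base_songs "male" (pyAssocGetD base_songs "female" [])
    else
      let female_songs := pyAssocGetD base_songs "female" []
      let male_songs := pyAssocGetD base_songs "male" []
      let max_len : Int := max (female_songs.length : Int) (male_songs.length : Int)
      let mixed_songs := (PySem.List.pyRange 0 max_len 1).foldl (fun acc i =>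
        let acc := if i < (female_songs.length : Int) then acc ++ [PySem.List.pyGetD female_songs i ""] else acc
        if i < (male_songs.length : Int) then acc ++ [PySem.List.pyGetD male_songs i ""] else acc) []
      PySem.List.slice mixed_songs none (some 6)

-- ===== PORT B =====
def select_songs_by_gender_py_alt (base_type : List (String × List (String × List String))) (gender : String) : List String :=
  match pyAssocGet? base_type "base_songs" with
  | none => []  -- KeyError in Python; excluded by Pre_
  | some base_songs =>
    let g := PySem.Str.lower gender
    if g == "female" then
      pyAssocGetD base_songs "female" (pyAssocGetD base_songs "male" [])
    else if g == "male" then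
      pyAssocGetD base_songs "male" (pyAssocGetD base_songs "female" [])
    else
      let female := pyAssocGetD base_songs "female" []
      let male := pyAssocGetD base_songs "male" []
      let mixed := (female.zip male).flatMap (fun p => [p.1, p.2])
      let k := mixed.length / 2
      let mixed := mixed ++ (if female.drop k ≠ [] then female.drop k else male.drop k)
      mixed.take 6

-- ===== PRECONDITION & SPEC =====
-- Pre_ excludes exactly the inputs where base_type has no "base_songs" key, on which Python A raises KeyError.
def Pre_select_songs_by_gender_py (base_type : List (String × List (String × List String))) (gender : String) : Prop :=
  (pyAssocGet? base_type "base_songs").isSome = true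
instance (base_type : List (String × List (String × List String))) (gender : String) : Decidable (Pre_select_songs_by_gender_py base_type gender) := by unfold Pre_select_songs_by_gender_py; infer_instance

def pvWitness_select_songs_by_gender_py : (List (String × List (String × List String))) × String :=
  ([("base_songs", [("female", ["f1", "f2"]), ("male", ["m1"])])], "unknown")

def Spec_select_songs_by_gender_py (base_type : List (String × List (String × List String))) (gender : String) (out : List String) : Prop := out = select_songs_by_gender_py_alt base_type gender
instance (base_type : List (String × List (String × List String))) (gender : String) (out : List String) : Decidable (Spec_select_songs_by_gender_py base_type gender out) := by unfold Spec_select_songs_by_gender_py; infer_instance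

-- ===== CLAIM (what is proved, stated in full; the proofs are below) =====
def Claim_equal_select_songs_by_gender_py : Prop := ∀ (base_type : List (String × List (String × List String))) (gender : String), Dom_select_songs_by_gender_py base_type gender → Pre_select_songs_by_gender_py base_type gender → Spec_select_songs_by_gender_py base_type gender (select_songs_by_gender_py base_type gender)

-- ===== LEMMAS AND PROOFS =====

-- the common interleaving both else-branches compute (proof-side reference)
def ilv : List String → List String → List String
  | [], ms => ms
  | f :: fs, [] => f :: fs
  | f :: fs, m :: ms => f :: m :: ilv fs ms

lemma ilv_nil_right (fs : List String) : ilv fs [] = fs := by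
  cases fs <;> rfl

-- A's loop body, chunk form
def chunkA (fs ms : List String) (k : Nat) : List String :=
  (if k < fs.length then [fs.getD k ""] else []) ++ (if k < ms.length then [ms.getD k ""] else [])

lemma flat_map_getD (xs : List String) :
    (List.range xs.length).flatMap (fun k => [xs.getD k ""]) = xs := by
  induction xs with
  | nil => rfl
  | cons x xs ih =>
    simp only [List.length_cons, List.range_succ_eq_map, List.flatMap_cons, List.flatMap_map,
      List.getD_cons_zero, List.singleton_append]
    exact congrArg (x :: ·) ih

lemma range_flatMap_chunk (fs ms : List String) :
    (List.range (max fs.length ms.length)).flatMap (chunkA fs ms) = ilv fs ms := by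
  induction fs generalizing ms with
  | nil =>
    have h : ∀ k ∈ List.range ms.length, chunkA [] ms k = [ms.getD k ""] := by
      intro k hk
      have := List.mem_range.mp hk
      simp [chunkA, this]
    have hm : max ([] : List String).length ms.length = ms.length := by simp
    rw [hm, List.flatMap_congr h, flat_map_getD]
    rfl
  | cons f fs ih =>
    cases ms with
    | nil =>
      have h : ∀ k ∈ List.range (f :: fs).length, chunkA (f :: fs) [] k = [(f :: fs).getD k ""] := by
        intro k hk
        have hlt := List.mem_range.mp hk
        simp only [List.length_cons] at hlt
        have hle : k ≤ fs.length := by omega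
        simp [chunkA, List.length_cons, hle]
      have hm : max (f :: fs).length ([] : List String).length = (f :: fs).length := by simp
      rw [hm, List.flatMap_congr h, flat_map_getD, ilv_nil_right]
    | cons m ms =>
      have hmax : max (f :: fs).length (m :: ms).length = max fs.length ms.length + 1 := by
        simp only [List.length_cons]; omega
      have hshift : ∀ k ∈ List.range (max fs.length ms.length),
          chunkA (f :: fs) (m :: ms) (k + 1) = chunkA fs ms k := by
        intro k _
        simp only [chunkA, List.length_cons, List.getD_cons_succ, Nat.add_lt_add_iff_right]
      have h0 : chunkA (f :: fs) (m :: ms) 0 = [f, m] := by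
        simp [chunkA]
      rw [hmax, List.range_succ_eq_map, List.flatMap_cons, h0, List.flatMap_map]
      rw [show (fun a => chunkA (f :: fs) (m :: ms) (a + 1)) = (fun k => chunkA (f :: fs) (m :: ms) (k + 1)) from rfl]
      rw [List.flatMap_congr hshift, ih ms]
      rfl

lemma foldA_eq_ilv (fs ms : List String) :
    (PySem.List.pyRange 0 (max (fs.length : Int) (ms.length : Int)) 1).foldl (fun acc i =>
        let acc := if i < (fs.length : Int) then acc ++ [PySem.List.pyGetD fs i ""] else acc
        if i < (ms.length : Int) then acc ++ [PySem.List.pyGetD ms i ""] else acc) []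
      = ilv fs ms := by
  have hcast : max (fs.length : Int) (ms.length : Int) = ((max fs.length ms.length : Nat) : Int) := by
    push_cast; rfl
  have hbody : ∀ (acc : List String), ∀ k ∈ List.range (max fs.length ms.length),
      (let acc' := if ((k : Nat) : Int) < (fs.length : Int) then acc ++ [PySem.List.pyGetD fs ((k : Nat) : Int) ""] else acc
       if ((k : Nat) : Int) < (ms.length : Int) then acc' ++ [PySem.List.pyGetD ms ((k : Nat) : Int) ""] else acc')
      = acc ++ chunkA fs ms k := by
    intro acc k _
    simp only [chunkA, PySem.List.pyGetD_natCast, Nat.cast_lt]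
    split_ifs <;> simp
  rw [hcast, PySem.List.pyRange_zero_natCast, List.foldl_map]
  exact (PySem.List.foldl_congr_mem _ _ _ _ hbody).trans
    (by rw [PySem.List.foldl_append_eq_flatMap, List.nil_append, range_flatMap_chunk])

lemma len_zipFlat (fs ms : List String) :
    ((fs.zip ms).flatMap (fun p => [p.1, p.2])).length = 2 * min fs.length ms.length := by
  induction fs generalizing ms with
  | nil => simp
  | cons f fs ih =>
    cases ms with
    | nil => simp
    | cons m ms =>
      simp only [List.zip_cons_cons, List.flatMap_cons, List.length_append, List.length_cons,
        ih, List.length_nil]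
      omega

lemma zipFlat_min_eq_ilv (fs ms : List String) :
    (fs.zip ms).flatMap (fun p => [p.1, p.2]) ++
      (if fs.drop (min fs.length ms.length) ≠ [] then fs.drop (min fs.length ms.length)
        else ms.drop (min fs.length ms.length)) = ilv fs ms := by
  induction fs generalizing ms with
  | nil => simp [ilv]
  | cons f fs ih =>
    cases ms with
    | nil => simp [ilv_nil_right]
    | cons m ms =>
      have hmin : min (f :: fs).length (m :: ms).length = min fs.length ms.length + 1 := by
        simp only [List.length_cons]; omega
      rw [hmin]
      simp only [List.zip_cons_cons, List.flatMap_cons, List.drop_succ_cons]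
      rw [show ([f, m] : List String) ++ (fs.zip ms).flatMap (fun p => [p.1, p.2]) =
            f :: m :: (fs.zip ms).flatMap (fun p => [p.1, p.2]) from rfl]
      rw [List.cons_append, List.cons_append, ih ms]
      rfl

lemma zipFlat_eq_ilv (fs ms : List String) :
    (fs.zip ms).flatMap (fun p => [p.1, p.2]) ++
      (if fs.drop (((fs.zip ms).flatMap (fun p => [p.1, p.2])).length / 2) ≠ [] then
          fs.drop (((fs.zip ms).flatMap (fun p => [p.1, p.2])).length / 2)
        else ms.drop (((fs.zip ms).flatMap (fun p => [p.1, p.2])).length / 2))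
      = ilv fs ms := by
  have hk : ((fs.zip ms).flatMap (fun p => [p.1, p.2])).length / 2 = min fs.length ms.length := by
    rw [len_zipFlat]; omega
  rw [hk]
  exact zipFlat_min_eq_ilv fs ms

lemma else_branch_eq (fs ms : List String) :
    PySem.List.slice
      ((PySem.List.pyRange 0 (max (fs.length : Int) (ms.length : Int)) 1).foldl (fun acc i =>
        let acc := if i < (fs.length : Int) then acc ++ [PySem.List.pyGetD fs i ""] else acc
        if i < (ms.length : Int) then acc ++ [PySem.List.pyGetD ms i ""] else acc) [])
      none (some 6)
    = ((fs.zip ms).flatMap (fun p => [p.1, p.2]) ++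
        (if fs.drop (((fs.zip ms).flatMap (fun p => [p.1, p.2])).length / 2) ≠ [] then
            fs.drop (((fs.zip ms).flatMap (fun p => [p.1, p.2])).length / 2)
          else ms.drop (((fs.zip ms).flatMap (fun p => [p.1, p.2])).length / 2))).take 6 := by
  rw [foldA_eq_ilv, zipFlat_eq_ilv]
  rw [show ((6 : Int)) = ((6 : Nat) : Int) from rfl, PySem.List.slice_to_natCast]

-- ===== VERDICT (by name: the statement is the Claim_ definition above) =====
theorem select_songs_by_gender_py_spec : Claim_equal_select_songs_by_gender_py := by
  intro base_type gender _ _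
  unfold Spec_select_songs_by_gender_py select_songs_by_gender_py select_songs_by_gender_py_alt
  cases pyAssocGet? base_type "base_songs" with
  | none => rfl
  | some base_songs =>
    by_cases h1 : PySem.Str.lower gender == "female"
    · simp [h1]
    · by_cases h2 : PySem.Str.lower gender == "male"
      · simp [h1, h2]
      · simp only [h1, h2, Bool.false_eq_true, if_false]
        exact else_branch_eq _ _
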